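-- pv_equiv track=rewrite | github.com/Vineel-Vaddi/beepbeep | streamlit/utils/storage.py | get_last_labeled_clip_idx
-- ===== SOURCE A (Python) =====
-- from typing import Dict, Any, List, Optional
--
-- def get_last_labeled_clip_idx(clips: List[Dict[str, Any]], ann_map: Dict[str, Dict[str, Any]]) -> Optional[int]:
--     last = None
--     for i, c in enumerate(clips):
--         cid = c["clip_id"]
--         rec = ann_map.get(cid)
--         status = rec.get("review_status", "unlabeled") if rec else "unlabeled"
--         if status != "unlabeled":
--             last = i
--     return last
-- ===== SOURCE B (Python) =====
-- from typing import Dict, Any, List, Optional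
--
-- def get_last_labeled_clip_idx(clips: List[Dict[str, Any]], ann_map: Dict[str, Dict[str, Any]]) -> Optional[int]:
--     # Scan backwards and return at the first (i.e. last) labeled clip.
--     for i in range(len(clips) - 1, -1, -1):
--         cid = clips[i]["clip_id"]
--         rec = ann_map.get(cid)
--         status = rec.get("review_status", "unlabeled") if rec else "unlabeled"
--         if status != "unlabeled":
--             return i
--     return None
-- ===== Notes on version B (the rewrite author's own statement) =====
-- stated objective: alternative
-- what changed: Replaces the forward full-pass accumulator with a backward early-terminating index search that returns at the first labeled clip seen from the end.
import Mathlib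
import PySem

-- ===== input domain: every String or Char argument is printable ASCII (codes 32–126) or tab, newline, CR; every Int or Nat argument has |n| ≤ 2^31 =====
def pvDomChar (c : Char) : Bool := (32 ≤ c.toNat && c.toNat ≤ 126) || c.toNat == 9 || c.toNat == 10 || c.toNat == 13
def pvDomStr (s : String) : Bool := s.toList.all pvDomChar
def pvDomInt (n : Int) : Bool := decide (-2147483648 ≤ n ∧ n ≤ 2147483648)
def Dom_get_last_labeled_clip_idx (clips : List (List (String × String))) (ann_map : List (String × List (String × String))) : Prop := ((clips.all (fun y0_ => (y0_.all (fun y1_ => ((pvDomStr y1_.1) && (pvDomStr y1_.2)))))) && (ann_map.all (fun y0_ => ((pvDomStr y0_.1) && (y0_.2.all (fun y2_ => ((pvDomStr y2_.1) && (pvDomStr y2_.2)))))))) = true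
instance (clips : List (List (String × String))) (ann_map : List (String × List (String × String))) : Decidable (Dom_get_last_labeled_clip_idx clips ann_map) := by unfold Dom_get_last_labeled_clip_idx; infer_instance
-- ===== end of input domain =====

-- B replaces A's forward full-pass accumulator with a backward early-returning index search
-- (alternative decomposition, same worst-case cost). Return-value equivalence only.

-- shared helper: the status computed for one clip record (identical subexpression in A and B)
def pvStatus (ann_map : List (String × List (String × String))) (c : List (String × String)) : String :=
  let cid := ((PySem.Dict.mk c).get? "clip_id").getD ""   -- c["clip_id"]; KeyError excluded by Pre_
  match (PySem.Dict.mk ann_map).get? cid with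
  | none => "unlabeled"
  | some rec => if rec = [] then "unlabeled" else ((PySem.Dict.mk rec).get? "review_status").getD "unlabeled"

-- ===== PORT A =====
def get_last_labeled_clip_idx (clips : List (List (String × String))) (ann_map : List (String × List (String × String))) : Option Int :=
  (PySem.List.enumerate clips 0).foldl
    (fun last ic => if pvStatus ann_map ic.2 ≠ "unlabeled" then some ic.1 else last) none

-- ===== PORT B =====
-- the backward loop 'for i in range(len(clips)-1, -1, -1)': bFind n scans i = n-1, n-2, …, 0
def bFind (ann_map : List (String × List (String × String))) (clips : List (List (String × String))) : Nat → Option Int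
  | 0 => none
  | n + 1 => if pvStatus ann_map (clips.getD n []) ≠ "unlabeled" then some (n : Int) else bFind ann_map clips n

def get_last_labeled_clip_idx_alt (clips : List (List (String × String))) (ann_map : List (String × List (String × String))) : Option Int :=
  bFind ann_map clips clips.length

-- ===== PRECONDITION & SPEC =====
-- Pre_ excludes exactly the inputs where some clip lacks the key "clip_id": there A raises KeyError.
def Pre_get_last_labeled_clip_idx (clips : List (List (String × String))) (ann_map : List (String × List (String × String))) : Prop :=
  ∀ c ∈ clips, ((PySem.Dict.mk c).get? "clip_id").isSome
instance (clips : List (List (String × String))) (ann_map : List (String × List (String × String))) : Decidable (Pre_get_last_labeled_clip_idx clips ann_map) := by unfold Pre_get_last_labeled_clip_idx; infer_instance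
def pvWitness_get_last_labeled_clip_idx : (List (List (String × String))) × (List (String × List (String × String))) :=
  ([[("clip_id", "a")], [("clip_id", "b")]], [("a", [("review_status", "done")])])

def Spec_get_last_labeled_clip_idx (clips : List (List (String × String))) (ann_map : List (String × List (String × String))) (out : Option Int) : Prop := out = get_last_labeled_clip_idx_alt clips ann_map
instance (clips : List (List (String × String))) (ann_map : List (String × List (String × String))) (out : Option Int) : Decidable (Spec_get_last_labeled_clip_idx clips ann_map out) := by unfold Spec_get_last_labeled_clip_idx; infer_instance

-- ===== CLAIM (what is proved, stated in full; the proofs are below) =====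
def Claim_equal_get_last_labeled_clip_idx : Prop := ∀ (clips : List (List (String × String))) (ann_map : List (String × List (String × String))), Dom_get_last_labeled_clip_idx clips ann_map → Pre_get_last_labeled_clip_idx clips ann_map → Spec_get_last_labeled_clip_idx clips ann_map (get_last_labeled_clip_idx clips ann_map)

-- ===== LEMMAS AND PROOFS =====

-- appending a clip does not change the backward search below the old length
lemma bFind_append (am : List (String × List (String × String))) (xs : List (List (String × String)))
    (x : List (String × String)) (n : Nat) (hn : n ≤ xs.length) :
    bFind am (xs ++ [x]) n = bFind am xs n := by
  induction n with
  | zero => rfl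
  | succ m ih =>
    have hm : m < xs.length := by omega
    simp only [bFind, List.getD_append _ _ _ _ hm, ih (by omega)]

-- A on xs equals the backward search started at xs.length
lemma fold_eq_bFind (am : List (String × List (String × String))) (clips : List (List (String × String))) :
    get_last_labeled_clip_idx clips am = bFind am clips clips.length := by
  induction clips using List.reverseRecOn with
  | nil => rfl
  | append_singleton xs x ih =>
    unfold get_last_labeled_clip_idx at *
    rw [PySem.List.enumerate_append, List.foldl_append, ih]
    simp only [List.length_append, List.length_singleton, bFind,
      bFind_append am xs x xs.length (le_refl _)]
    simp [PySem.List.enumerate]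

-- ===== VERDICT (by name: the statement is the Claim_ definition above) =====
theorem get_last_labeled_clip_idx_spec : Claim_equal_get_last_labeled_clip_idx := by
  intro clips ann_map _ _
  unfold Spec_get_last_labeled_clip_idx get_last_labeled_clip_idx_alt
  exact fold_eq_bFind ann_map clips
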